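-- pv_equiv track=rewrite | github.com/Andboogl/CryptoApp | src/modules/data_encrypt.py | decrypt_string_with_data
-- ===== SOURCE A (Python) =====
-- def decrypt_string_with_data(encrypted: str, data_to_decrypt):
--     """Decrypt encrypted string
--
--     Args:
--         encrypted (str): encrypted string
--         data_to_decrypt (tuple or list): data to decrypt
--
--     Returns:
--         str: decrypted string
--     """
--     new_encrypted = []
--     counter = 0
--     last_num = 0
--
--     for i in encrypted:
--         if i in ('D', 'T', 'L', 'M'):
--             new_encrypted.append(encrypted[last_num:counter])
--             last_num = counter + 1
--
--         else:
--             if counter + 1 == len(encrypted):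
--                 new_encrypted.append(encrypted[last_num:])
--
--         counter += 1
--
--     encrypted = new_encrypted.copy()
--
--     decrypted = ''
--     symbols_and_data = list(zip(encrypted, data_to_decrypt))
--     counter = 0
--
--     for i in encrypted:
--         decrypted += chr(int(i) - symbols_and_data[counter][1])
--         counter += 1
--
--     return decrypted
-- ===== SOURCE B (Python) =====
-- def decrypt_string_with_data(encrypted: str, data_to_decrypt):
--     """Decrypt encrypted string (single pass: flush each segment as soon as
--     its delimiter is seen, indexing data_to_decrypt directly)."""
--     out = []
--     seg_chars = []
--     idx = 0
--     for ch in encrypted: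
--         if ch in 'DTLM':
--             out.append(chr(int(''.join(seg_chars)) - data_to_decrypt[idx]))
--             idx += 1
--             seg_chars = []
--         else:
--             seg_chars.append(ch)
--     if encrypted and encrypted[-1] not in 'DTLM':
--         out.append(chr(int(''.join(seg_chars)) - data_to_decrypt[idx]))
--     return ''.join(out)
-- ===== Notes on version B (the rewrite author's own statement) =====
-- stated objective: simpler
-- what changed: A makes two passes (collect segment slices by index bookkeeping, then decode them against a zip of segments and data); B makes one pass that accumulates the current segment's characters and decodes each segment directly against data_to_decrypt the moment its delimiter is seen, with no intermediate segment list, no slicing and no zip.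
import Mathlib
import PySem

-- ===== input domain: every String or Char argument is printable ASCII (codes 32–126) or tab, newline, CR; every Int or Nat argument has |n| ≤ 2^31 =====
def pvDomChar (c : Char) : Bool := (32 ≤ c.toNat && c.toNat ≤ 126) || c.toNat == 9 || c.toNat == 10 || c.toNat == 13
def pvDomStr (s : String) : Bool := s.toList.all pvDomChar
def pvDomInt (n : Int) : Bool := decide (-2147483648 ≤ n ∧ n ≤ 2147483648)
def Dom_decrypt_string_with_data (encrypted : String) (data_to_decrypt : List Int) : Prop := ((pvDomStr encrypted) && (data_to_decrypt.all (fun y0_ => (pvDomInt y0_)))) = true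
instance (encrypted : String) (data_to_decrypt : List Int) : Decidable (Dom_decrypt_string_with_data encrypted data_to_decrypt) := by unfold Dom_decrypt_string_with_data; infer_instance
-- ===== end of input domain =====

-- B replaces A's two passes (collect index-slices of segments, then decode them against
-- a zip) by one pass that accumulates the current segment's characters and decodes each
-- segment against data_to_decrypt the moment its delimiter is seen (objective: simpler).

-- shared helpers (both Pythons test membership in 'DTLM', call int() and chr())
def pvIsDelim (c : Char) : Bool := c == 'D' || c == 'T' || c == 'L' || c == 'M'

-- Python's chr(n): valid for 0 ≤ n ≤ 0x10FFFF (ValueError outside, excluded by Pre_);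
-- exact except for surrogate code points 0xD800–0xDFFF, which Lean's Char cannot hold
-- and which Pre_ excludes.
def pvChrOK (n : Int) : Bool := 0 ≤ n && n ≤ 1114111 && !(55296 ≤ n && n ≤ 57343)
def pyChr (n : Int) : List Char := if pvChrOK n then [Char.ofNat n.toNat] else []

-- ===== PORT A =====
def decrypt_string_with_data (encrypted : String) (data_to_decrypt : List Int) : String :=
  let cs := encrypted.toList
  -- first loop: build new_encrypted from slices encrypted[last_num:counter]
  let st := (PySem.List.enumerate cs 0).foldl
    (fun (st : List (List Char) × Int) (p : Int × Char) =>
      if pvIsDelim p.2 then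
        (st.1 ++ [PySem.List.slice cs (some st.2) (some p.1)], p.1 + 1)
      else if p.1 + 1 = PySem.Str.len encrypted then
        (st.1 ++ [PySem.List.slice cs (some st.2) none], st.2)
      else st) ([], 0)
  let segs := st.1
  let sad := segs.zip data_to_decrypt
  -- second loop: decrypted += chr(int(i) - symbols_and_data[counter][1])
  let dec := segs.foldl
    (fun (d : List Char × Int) (i : List Char) =>
      (d.1 ++ pyChr ((PySem.Int.ofChars? i).getD 0 - (PySem.List.pyGetD sad d.2 ([], 0)).2), d.2 + 1))
    ([], 0)
  String.ofList dec.1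

-- ===== PORT B =====
def decrypt_string_with_data_alt (encrypted : String) (data_to_decrypt : List Int) : String :=
  let cs := encrypted.toList
  -- single pass: (out, seg_chars, idx)
  let st := cs.foldl
    (fun (st : List Char × List Char × Int) (ch : Char) =>
      if pvIsDelim ch then
        (st.1 ++ pyChr ((PySem.Int.ofChars? st.2.1).getD 0 - PySem.List.pyGetD data_to_decrypt st.2.2 0),
         ([] : List Char), st.2.2 + 1)
      else (st.1, st.2.1 ++ [ch], st.2.2)) ([], [], 0)
  -- if encrypted and encrypted[-1] not in 'DTLM': flush the trailing segment
  match cs.getLast? with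
  | none => String.ofList st.1
  | some c =>
      if pvIsDelim c then String.ofList st.1
      else String.ofList (st.1 ++ pyChr ((PySem.Int.ofChars? st.2.1).getD 0 - PySem.List.pyGetD data_to_decrypt st.2.2 0))

-- ===== PRECONDITION & SPEC =====
-- the segments A slices out of `encrypted`: pieces between 'D'/'T'/'L'/'M' delimiters,
-- with a trailing piece only when the string does not end in a delimiter
def pvSegs (seg : List Char) : List Char → List (List Char)
  | [] => []
  | c :: t =>
      if pvIsDelim c then seg :: pvSegs [] t
      else if t = [] then [seg ++ [c]] else pvSegs (seg ++ [c]) t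

-- Pre_ excludes exactly the inputs where the Python raises (IndexError when there are
-- more segments than data, ValueError when a segment is not an int literal or chr gets
-- an out-of-range argument) plus the inputs where chr would yield a surrogate code
-- point (A returns a one-surrogate string there, not representable as a Lean String).
def Pre_decrypt_string_with_data (encrypted : String) (data_to_decrypt : List Int) : Prop :=
  (pvSegs [] encrypted.toList).length ≤ data_to_decrypt.length ∧
  ((pvSegs [] encrypted.toList).zip data_to_decrypt).all
    (fun p => ((PySem.Int.ofChars? p.1).map (fun v => pvChrOK (v - p.2))).getD false) = true
instance (encrypted : String) (data_to_decrypt : List Int) : Decidable (Pre_decrypt_string_with_data encrypted data_to_decrypt) := by unfold Pre_decrypt_string_with_data; infer_instance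

def pvWitness_decrypt_string_with_data : String × List Int := ("105D106", [5, 6])

def Spec_decrypt_string_with_data (encrypted : String) (data_to_decrypt : List Int) (out : String) : Prop := out = decrypt_string_with_data_alt encrypted data_to_decrypt
instance (encrypted : String) (data_to_decrypt : List Int) (out : String) : Decidable (Spec_decrypt_string_with_data encrypted data_to_decrypt out) := by unfold Spec_decrypt_string_with_data; infer_instance

-- ===== CLAIM (what is proved, stated in full; the proofs are below) =====
def Claim_equal_decrypt_string_with_data : Prop := ∀ (encrypted : String) (data_to_decrypt : List Int), Dom_decrypt_string_with_data encrypted data_to_decrypt → Pre_decrypt_string_with_data encrypted data_to_decrypt → Spec_decrypt_string_with_data encrypted data_to_decrypt (decrypt_string_with_data encrypted data_to_decrypt)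

-- ===== LEMMAS AND PROOFS =====

-- decoding one segment against one datum
def decSeg (s : List Char) (d : Int) : List Char :=
  pyChr ((PySem.Int.ofChars? s).getD 0 - d)

-- decoding a list of segments against data_to_decrypt from index k on
def decAll (data : List Int) : List (List Char) → Nat → List Char
  | [], _ => []
  | s :: r, k => decSeg s (PySem.List.pyGetD data (k : Int) 0) ++ decAll data r (k + 1)

-- the segments closed by a delimiter (no trailing piece), and the pending tail piece
def closedSegs (seg : List Char) : List Char → List (List Char)
  | [] => []
  | c :: t => if pvIsDelim c then seg :: closedSegs [] t else closedSegs (seg ++ [c]) t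

def pendSeg (seg : List Char) : List Char → List Char
  | [] => seg
  | c :: t => if pvIsDelim c then pendSeg [] t else pendSeg (seg ++ [c]) t

lemma decAll_append (data : List Int) (xs ys : List (List Char)) (k : Nat) :
    decAll data (xs ++ ys) k = decAll data xs k ++ decAll data ys (k + xs.length) := by
  induction xs generalizing k with
  | nil => simp [decAll]
  | cons s r ih => simp [decAll, ih, Nat.add_assoc, Nat.add_comm 1 r.length]

lemma pvSegs_eq_closed_pend (t : List Char) : ∀ seg : List Char,
    pvSegs seg t = closedSegs seg t ++
      (match t.getLast? with
       | none => []
       | some c => if pvIsDelim c then [] else [pendSeg seg t]) := by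
  induction t with
  | nil => intro seg; simp [pvSegs, closedSegs]
  | cons c t ih =>
      intro seg
      cases t with
      | nil =>
          by_cases hd : pvIsDelim c
          · simp [pvSegs, closedSegs, hd]
          · simp [pvSegs, closedSegs, pendSeg, hd]
      | cons c' t' =>
          by_cases hd : pvIsDelim c
          · have lhs : pvSegs seg (c :: c' :: t') = seg :: pvSegs [] (c' :: t') := by
              simp [pvSegs, hd]
            have rhs : closedSegs seg (c :: c' :: t') = seg :: closedSegs [] (c' :: t') := by
              simp [closedSegs, hd]
            have rp : pendSeg seg (c :: c' :: t') = pendSeg [] (c' :: t') := by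
              simp [pendSeg, hd]
            rw [lhs, rhs, List.getLast?_cons_cons, rp, ih [], List.cons_append]
          · have lhs : pvSegs seg (c :: c' :: t') = pvSegs (seg ++ [c]) (c' :: t') := by
              simp [pvSegs, hd]
            have rhs : closedSegs seg (c :: c' :: t') = closedSegs (seg ++ [c]) (c' :: t') := by
              simp [closedSegs, hd]
            have rp : pendSeg seg (c :: c' :: t') = pendSeg (seg ++ [c]) (c' :: t') := by
              simp [pendSeg, hd]
            rw [lhs, rhs, List.getLast?_cons_cons, rp, ih (seg ++ [c])]

-- A's first loop computes exactly the pvSegs segmentation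
lemma segsA (cs : List Char) (t : List Char) : ∀ (pre : List Char) (acc : List (List Char)) (last : Nat),
    cs = pre ++ t → last ≤ pre.length →
    ((PySem.List.enumerate t (pre.length : Int)).foldl
      (fun (st : List (List Char) × Int) (p : Int × Char) =>
        if pvIsDelim p.2 then
          (st.1 ++ [PySem.List.slice cs (some st.2) (some p.1)], p.1 + 1)
        else if p.1 + 1 = (cs.length : Int) then
          (st.1 ++ [PySem.List.slice cs (some st.2) none], st.2)
        else st) (acc, (last : Int))).1
    = acc ++ pvSegs (pre.drop last) t := by
  induction t with
  | nil => intro pre acc last _ _; simp [PySem.List.enumerate, pvSegs]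
  | cons c t ih =>
      intro pre acc last hcs hlast
      rw [PySem.List.enumerate_cons]
      have hslice : PySem.List.slice cs (some (last : Int)) (some (pre.length : Int))
          = pre.drop last := by
        rw [PySem.List.slice_natCast, hcs, List.drop_append_of_le_length hlast]
        exact List.take_left' (by simp)
      have hlen : cs.length = pre.length + 1 + t.length := by
        simp only [hcs, List.length_append, List.length_cons]; omega
      simp only [List.foldl_cons]
      by_cases hd : pvIsDelim c
      · have h1 : ((pre.length : Int) + 1) = (((pre ++ [c]).length : Nat) : Int) := by
          simp
        rw [if_pos hd, hslice, h1]
        rw [ih (pre ++ [c]) _ (pre ++ [c]).length (by simp [hcs]) le_rfl]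
        simp [pvSegs, hd]
      · rw [if_neg hd]
        by_cases hend : ((pre.length : Int) + 1) = (cs.length : Int)
        · -- last character of the string: t must be []
          have ht : t = [] := by
            have h2 : ((pre.length : Int) + 1) = ((pre.length + 1 + t.length : Nat) : Int) := by
              rw [← hlen]; exact hend
            have h3 : t.length = 0 := by push_cast at h2; omega
            exact List.length_eq_zero_iff.mp h3
          subst ht
          rw [if_pos hend]
          have hfrom : PySem.List.slice cs (some (last : Int)) none = pre.drop last ++ [c] := by
            rw [PySem.List.slice_from_natCast, hcs, List.drop_append_of_le_length hlast]
          simp [PySem.List.enumerate, pvSegs, hd, hfrom]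
        · rw [if_neg hend]
          have ht : t ≠ [] := by
            intro h; subst h
            apply hend
            rw [hlen]; push_cast; simp
          have h1 : ((pre.length : Int) + 1) = (((pre ++ [c]).length : Nat) : Int) := by
            simp
          rw [h1, ih (pre ++ [c]) acc last (by simp [hcs]) (by simp; omega)]
          rw [List.drop_append_of_le_length hlast]
          simp [pvSegs, hd, ht]

-- A's second loop decodes the segment list like decAll
lemma decodeA (ss : List (List Char)) (data : List Int) (u : List (List Char)) :
    ∀ (k : Nat) (acc : List Char), ss.drop k = u →
    ((u.foldl
      (fun (d : List Char × Int) (i : List Char) =>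
        (d.1 ++ pyChr ((PySem.Int.ofChars? i).getD 0 - (PySem.List.pyGetD (ss.zip data) d.2 ([], 0)).2), d.2 + 1))
      (acc, (k : Int))).1) = acc ++ decAll data u k := by
  induction u with
  | nil => intro k acc _; simp [decAll]
  | cons s u ih =>
      intro k acc hdrop
      have hk : k < ss.length := by
        by_contra h
        rw [List.drop_of_length_le (by omega)] at hdrop
        exact (List.cons_ne_nil s u) hdrop.symm
      have hget : (PySem.List.pyGetD (ss.zip data) (k : Int) ([], 0)).2
          = PySem.List.pyGetD data (k : Int) 0 := by
        rw [PySem.List.pyGetD_natCast, PySem.List.pyGetD_natCast]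
        by_cases hkd : k < data.length
        · rw [List.getD_eq_getElem _ _ (by simp [List.length_zip]; omega),
              List.getD_eq_getElem _ _ hkd, List.getElem_zip]
        · rw [List.getD_eq_default _ _ (by simp [List.length_zip]; omega),
              List.getD_eq_default _ _ (by omega)]
      have hdrop' : ss.drop (k + 1) = u := by
        rw [← List.tail_drop, hdrop, List.tail_cons]
      simp only [List.foldl_cons]
      have h1 : ((k : Int) + 1) = (((k + 1 : Nat)) : Int) := by push_cast; ring
      rw [hget, h1, ih (k + 1) _ hdrop']
      simp [decAll, decSeg]

-- B's loop: invariant over (out, seg_chars, idx)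
lemma loopB (data : List Int) (t : List Char) : ∀ (out seg : List Char) (k : Nat),
    t.foldl
      (fun (st : List Char × List Char × Int) (ch : Char) =>
        if pvIsDelim ch then
          (st.1 ++ pyChr ((PySem.Int.ofChars? st.2.1).getD 0 - PySem.List.pyGetD data st.2.2 0),
           ([] : List Char), st.2.2 + 1)
        else (st.1, st.2.1 ++ [ch], st.2.2)) (out, seg, (k : Int))
    = (out ++ decAll data (closedSegs seg t) k, pendSeg seg t,
       (((k + (closedSegs seg t).length : Nat)) : Int)) := by
  induction t with
  | nil => intro out seg k; simp [closedSegs, pendSeg, decAll]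
  | cons c t ih =>
      intro out seg k
      by_cases hd : pvIsDelim c
      · simp only [List.foldl_cons, if_pos hd]
        have h1 : ((k : Int) + 1) = (((k + 1 : Nat)) : Int) := by push_cast; ring
        rw [h1, ih]
        simp [closedSegs, pendSeg, hd, decAll, decSeg, Nat.add_assoc, Nat.add_comm 1]
      · simp only [List.foldl_cons, if_neg hd]
        rw [ih]
        simp [closedSegs, pendSeg, hd]

-- the three loops at their actual starting states
lemma segsA0 (encrypted : String) :
    ((PySem.List.enumerate encrypted.toList 0).foldl
      (fun (st : List (List Char) × Int) (p : Int × Char) =>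
        if pvIsDelim p.2 then
          (st.1 ++ [PySem.List.slice encrypted.toList (some st.2) (some p.1)], p.1 + 1)
        else if p.1 + 1 = PySem.Str.len encrypted then
          (st.1 ++ [PySem.List.slice encrypted.toList (some st.2) none], st.2)
        else st) ([], 0)).1 = pvSegs [] encrypted.toList := by
  have h := segsA encrypted.toList encrypted.toList [] [] 0 (by simp) (by simp)
  simpa [PySem.Str.len_eq] using h

lemma decodeA0 (ss : List (List Char)) (data : List Int) :
    ((ss.foldl
      (fun (d : List Char × Int) (i : List Char) =>
        (d.1 ++ pyChr ((PySem.Int.ofChars? i).getD 0 - (PySem.List.pyGetD (ss.zip data) d.2 ([], 0)).2), d.2 + 1))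
      ([], 0)).1) = decAll data ss 0 := by
  simpa using decodeA ss data ss 0 [] (by simp)

lemma loopB0 (data : List Int) (t : List Char) :
    t.foldl
      (fun (st : List Char × List Char × Int) (ch : Char) =>
        if pvIsDelim ch then
          (st.1 ++ pyChr ((PySem.Int.ofChars? st.2.1).getD 0 - PySem.List.pyGetD data st.2.2 0),
           ([] : List Char), st.2.2 + 1)
        else (st.1, st.2.1 ++ [ch], st.2.2)) ([], [], 0)
    = (decAll data (closedSegs [] t) 0, pendSeg [] t, (((closedSegs [] t).length : Nat) : Int)) := by
  simpa using loopB data t [] [] 0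

-- ===== VERDICT (by name: the statement is the Claim_ definition above) =====
theorem decrypt_string_with_data_spec : Claim_equal_decrypt_string_with_data := by
  intro encrypted data _ _
  unfold Spec_decrypt_string_with_data
  simp only [decrypt_string_with_data, decrypt_string_with_data_alt]
  rw [segsA0, decodeA0, loopB0]
  rw [pvSegs_eq_closed_pend]
  cases hlast : encrypted.toList.getLast? with
  | none =>
      have h0 : encrypted.toList = [] := List.getLast?_eq_none_iff.mp hlast
      simp [h0, closedSegs, decAll]
  | some c =>
      by_cases hd : pvIsDelim c
      · simp [hd]
      · simp only [hd, Bool.false_eq_true, if_false, decAll_append, decAll, decSeg,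
          List.append_nil, Nat.zero_add]
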